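-- pv_equiv track=rewrite | github.com/viniciuspaschoal/controle-ativos-ti | python/auditoria.py | obter_status_final
-- ===== SOURCE A (Python) =====
-- def obter_status_final(esperados, lidos_ok, divergencias_confirmadas):
--     esperados_ids = {m[0] for m in esperados if m[0] is not None}
--
--     if divergencias_confirmadas:
--         return "DIVERGENTE"
--
--     if esperados_ids and esperados_ids.issubset(lidos_ok):
--         return "OK"
--
--     if esperados_ids and not esperados_ids.issubset(lidos_ok):
--         return "INCOMPLETA"
--
--     return "OK"
-- ===== SOURCE B (Python) =====
-- def obter_status_final(esperados, lidos_ok, divergencias_confirmadas):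
--     if divergencias_confirmadas:
--         return "DIVERGENTE"
--     need = sorted({m[0] for m in esperados if m[0] is not None})
--     have = sorted(set(lidos_ok))
--     i = j = 0
--     while i < len(need):
--         if j >= len(have):
--             return "INCOMPLETA"
--         if have[j] < need[i]:
--             j += 1
--         elif have[j] == need[i]:
--             i += 1
--             j += 1
--         else:
--             return "INCOMPLETA"
--     return "OK"
-- ===== Notes on version B (the rewrite author's own statement) =====
-- stated objective: alternative
-- what changed: Replaces the set comprehension plus issubset tests by sorting the deduplicated expected ids and read ids and deciding the subset relation with a two-pointer merge scan that exits at the first missing id.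
import Mathlib
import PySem

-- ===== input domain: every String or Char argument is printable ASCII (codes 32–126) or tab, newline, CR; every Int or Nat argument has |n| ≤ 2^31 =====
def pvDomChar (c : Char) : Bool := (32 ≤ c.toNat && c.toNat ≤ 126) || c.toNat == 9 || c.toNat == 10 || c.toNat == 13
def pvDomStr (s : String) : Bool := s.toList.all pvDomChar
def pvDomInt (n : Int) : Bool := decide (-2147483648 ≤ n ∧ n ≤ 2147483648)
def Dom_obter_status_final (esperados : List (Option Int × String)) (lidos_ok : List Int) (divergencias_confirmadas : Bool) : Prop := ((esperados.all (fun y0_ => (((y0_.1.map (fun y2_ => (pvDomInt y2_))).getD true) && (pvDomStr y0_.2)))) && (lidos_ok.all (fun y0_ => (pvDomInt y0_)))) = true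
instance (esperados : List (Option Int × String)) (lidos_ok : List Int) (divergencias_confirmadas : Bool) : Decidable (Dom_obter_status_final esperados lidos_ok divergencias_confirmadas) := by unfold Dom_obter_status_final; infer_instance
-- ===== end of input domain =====

-- B decides the subset test by sorting the deduplicated expected/read ids and running a two-pointer merge scan (alternative algorithm).

-- ===== PORT A =====
def obter_status_final (esperados : List (Option Int × String)) (lidos_ok : List Int) (divergencias_confirmadas : Bool) : String :=
  let esperados_ids : PySem.Set Int :=
    PySem.Set.ofList ((esperados.filter (fun m => m.1.isSome)).map (fun m => m.1.getD 0))
  if divergencias_confirmadas then "DIVERGENTE"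
  else if !esperados_ids.isEmpty && PySem.Set.issubset esperados_ids lidos_ok then "OK"
  else if !esperados_ids.isEmpty && !PySem.Set.issubset esperados_ids lidos_ok then "INCOMPLETA"
  else "OK"

-- ===== PORT B =====
-- the while loop of Source B: instead of indices i/j into need/have, the two suffixes
-- need[i:] / have[j:] are carried (the same scan, expressed as structural recursion)
def obterMerge : List Int → List Int → String
  | [], _ => "OK"
  | _ :: _, [] => "INCOMPLETA"
  | n :: ns, h :: hs =>
    if h < n then obterMerge (n :: ns) hs
    else if h == n then obterMerge ns hs
    else "INCOMPLETA"

def obter_status_final_alt (esperados : List (Option Int × String)) (lidos_ok : List Int) (divergencias_confirmadas : Bool) : String :=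
  if divergencias_confirmadas then "DIVERGENTE"
  else
    let need := PySem.List.sorted
      (PySem.Set.ofList ((esperados.filter (fun m => m.1.isSome)).map (fun m => m.1.getD 0)))
      (fun x => x) false
    let have_ := PySem.List.sorted (PySem.Set.ofList lidos_ok) (fun x => x) false
    obterMerge need have_

-- ===== PRECONDITION & SPEC =====
def Spec_obter_status_final (esperados : List (Option Int × String)) (lidos_ok : List Int) (divergencias_confirmadas : Bool) (out : String) : Prop := out = obter_status_final_alt esperados lidos_ok divergencias_confirmadas
instance (esperados : List (Option Int × String)) (lidos_ok : List Int) (divergencias_confirmadas : Bool) (out : String) : Decidable (Spec_obter_status_final esperados lidos_ok divergencias_confirmadas out) := by unfold Spec_obter_status_final; infer_instance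

-- ===== CLAIM (what is proved, stated in full; the proofs are below) =====
def Claim_equal_obter_status_final : Prop := ∀ (esperados : List (Option Int × String)) (lidos_ok : List Int) (divergencias_confirmadas : Bool), Dom_obter_status_final esperados lidos_ok divergencias_confirmadas → Spec_obter_status_final esperados lidos_ok divergencias_confirmadas (obter_status_final esperados lidos_ok divergencias_confirmadas)

-- ===== LEMMAS AND PROOFS =====

-- on strictly increasing lists the merge scan decides the subset relation
theorem obterMerge_eq (have_ : List Int) : ∀ (need : List Int),
    need.Pairwise (· < ·) → have_.Pairwise (· < ·) →
    obterMerge need have_ = (if ∀ x ∈ need, x ∈ have_ then "OK" else "INCOMPLETA") := by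
  induction have_ with
  | nil =>
    intro need hn _
    cases need with
    | nil => simp [obterMerge]
    | cons n ns =>
      have hno : ¬ ∀ x ∈ n :: ns, x ∈ ([] : List Int) := by
        intro hall; simpa using hall n List.mem_cons_self
      rw [obterMerge, if_neg hno]
  | cons h hs ih =>
    intro need hn hh
    cases need with
    | nil => simp [obterMerge]
    | cons n ns =>
      have hns := (List.pairwise_cons.mp hn).2
      have hnlt := (List.pairwise_cons.mp hn).1
      have hhs := (List.pairwise_cons.mp hh).2
      have hhlt := (List.pairwise_cons.mp hh).1
      by_cases h1 : h < n
      · have hiff : (∀ x ∈ n :: ns, x ∈ h :: hs) ↔ (∀ x ∈ n :: ns, x ∈ hs) := by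
          constructor
          · intro hall x hx
            rcases List.mem_cons.mp (hall x hx) with rfl | hxs
            · exfalso
              rcases List.mem_cons.mp hx with rfl | hxns
              · omega
              · have := hnlt _ hxns; omega
            · exact hxs
          · intro hall x hx
            exact List.mem_cons_of_mem h (hall x hx)
        rw [obterMerge, if_pos h1, ih (n :: ns) hn hhs]
        simp only [hiff]
      · by_cases h2 : h = n
        · subst h2
          have hiff : (∀ x ∈ h :: ns, x ∈ h :: hs) ↔ (∀ x ∈ ns, x ∈ hs) := by
            constructor
            · intro hall x hx
              have hmem := hall x (List.mem_cons_of_mem h hx)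
              rcases List.mem_cons.mp hmem with rfl | hin
              · exfalso; have := hnlt x hx; omega
              · exact hin
            · intro hall x hx
              rcases List.mem_cons.mp hx with rfl | hxs
              · exact List.mem_cons_self
              · exact List.mem_cons_of_mem h (hall x hxs)
          rw [obterMerge, if_neg h1, if_pos (by simp), ih ns hns hhs]
          simp only [hiff]
        · have hno : ¬ ∀ x ∈ n :: ns, x ∈ h :: hs := by
            intro hall
            rcases List.mem_cons.mp (hall n List.mem_cons_self) with rfl | hmem
            · exact h2 rfl
            · have := hhlt n hmem; omega
          rw [obterMerge, if_neg h1, if_neg (by simpa using h2), if_neg hno]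

theorem obter_status_final_spec' (esperados : List (Option Int × String)) (lidos_ok : List Int)
    (divergencias_confirmadas : Bool) :
    obter_status_final esperados lidos_ok divergencias_confirmadas =
      obter_status_final_alt esperados lidos_ok divergencias_confirmadas := by
  unfold obter_status_final obter_status_final_alt
  cases divergencias_confirmadas with
  | true => simp
  | false =>
    simp only [Bool.false_eq_true, if_false]
    set L := (esperados.filter (fun m => m.1.isSome)).map (fun m => m.1.getD 0) with hL
    -- B side: evaluate the merge scan
    rw [obterMerge_eq _ _ (PySem.List.sorted_ofList_pairwise_lt L)
      (PySem.List.sorted_ofList_pairwise_lt lidos_ok)]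
    have hmm : (∀ x ∈ PySem.List.sorted (PySem.Set.ofList L) (fun x => x) false,
        x ∈ PySem.List.sorted (PySem.Set.ofList lidos_ok) (fun x => x) false)
        ↔ (∀ x ∈ PySem.Set.ofList L, x ∈ lidos_ok) := by
      constructor
      · intro hall x hx
        have := hall x ((PySem.List.mem_sorted _ _ _ _).mpr hx)
        exact (PySem.Set.mem_ofList _ _).mp ((PySem.List.mem_sorted _ _ _ _).mp this)
      · intro hall x hx
        exact (PySem.List.mem_sorted _ _ _ _).mpr
          ((PySem.Set.mem_ofList _ _).mpr (hall x ((PySem.List.mem_sorted _ _ _ _).mp hx)))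
    -- A side: case on subset and emptiness
    by_cases hsub : PySem.Set.issubset (PySem.Set.ofList L) lidos_ok = true
    · have hcond : ∀ x ∈ PySem.Set.ofList L, x ∈ lidos_ok := (PySem.Set.issubset_iff _ _).mp hsub
      rw [if_pos (hmm.mpr hcond)]
      by_cases hemp : (PySem.Set.ofList L).isEmpty = true
      · simp [hemp, hsub]
      · simp [Bool.eq_false_iff.mpr hemp, hsub]
    · have hcond : ¬ ∀ x ∈ PySem.Set.ofList L, x ∈ lidos_ok := by
        intro hc; exact hsub ((PySem.Set.issubset_iff _ _).mpr hc)
      rw [if_neg (fun hc => hcond (hmm.mp hc))]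
      have hne : (PySem.Set.ofList L).isEmpty = false := by
        rw [List.isEmpty_eq_false_iff]
        intro hnil
        exact hcond (by rw [hnil]; intro x hx; simp at hx)
      simp [hne, Bool.eq_false_iff.mpr hsub]

-- ===== VERDICT (by name: the statement is the Claim_ definition above) =====
theorem obter_status_final_spec : Claim_equal_obter_status_final := by
  intro es li d _
  unfold Spec_obter_status_final
  exact obter_status_final_spec' es li d
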